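-- pv_equiv track=rewrite | github.com/Jung-jieun/Coding-Test | 프로그래머스/1/42840. 모의고사/모의고사.py | solution
-- ===== SOURCE A (Python) =====
-- def solution(answers):
--     result = []
--     student_1 = [1,2,3,4,5]
--     student_2 = [2,1,2,3,2,4,2,5]
--     student_3 = [3,3,1,1,2,2,4,4,5,5]
--
--     num_1 = 0
--     num_2 = 0
--     num_3 = 0
--
--     for idx, answer in enumerate(answers):
--         if answer == student_1[idx%5]:
--             num_1 += 1
--         if answer == student_2[idx%8]:
--             num_2 += 1
--         if answer == student_3[idx%10]:
--             num_3 += 1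
--
--     result.append(num_1)
--     result.append(num_2)
--     result.append(num_3)
--
--     winner = []
--     for student, number in enumerate(result):
--         if number == max(result):
--             winner.append(student+1)
--     return winner
-- ===== SOURCE B (Python) =====
-- def _score(pat, answers):
--     # one pass over the answers, walking the pattern cyclically (no index arithmetic)
--     total = 0
--     rest = []
--     for a in answers:
--         if not rest:
--             rest = list(pat)
--         p = rest.pop(0)
--         if a == p:
--             total += 1
--     return total
--
--
-- def solution(answers):
--     patterns = [[1, 2, 3, 4, 5],
--                 [2, 1, 2, 3, 2, 4, 2, 5],
--                 [3, 3, 1, 1, 2, 2, 4, 4, 5, 5]]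
--     scores = [_score(pat, answers) for pat in patterns]
--     best = max(scores)
--     return [i + 1 for i, s in enumerate(scores) if s == best]
-- ===== Notes on version B (the rewrite author's own statement) =====
-- stated objective: idiomatic
-- what changed: One combined loop with three conditionals and modular indexing is replaced by one independent cyclic-walk pass per pattern (a rotating 'rest' list instead of idx%len arithmetic), then best = max(scores) and a comprehension over enumerate(scores).
import Mathlib
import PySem

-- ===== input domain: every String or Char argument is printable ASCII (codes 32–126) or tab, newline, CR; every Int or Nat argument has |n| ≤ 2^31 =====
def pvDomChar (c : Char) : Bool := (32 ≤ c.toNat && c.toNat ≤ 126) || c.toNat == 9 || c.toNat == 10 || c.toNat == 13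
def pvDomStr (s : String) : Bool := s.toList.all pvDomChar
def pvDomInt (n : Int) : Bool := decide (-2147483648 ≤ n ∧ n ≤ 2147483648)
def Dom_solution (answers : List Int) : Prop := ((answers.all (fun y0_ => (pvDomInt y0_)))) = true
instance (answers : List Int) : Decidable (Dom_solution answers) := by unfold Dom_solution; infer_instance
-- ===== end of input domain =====

-- B replaces A's single loop (three conditionals with idx%5/idx%8/idx%10 indexing) by one
-- independent cyclic-walk pass per pattern, then max(scores) and a comprehension (idiomatic, not faster).

-- ===== PORT A =====
def pat1 : List Int := [1, 2, 3, 4, 5]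
def pat2 : List Int := [2, 1, 2, 3, 2, 4, 2, 5]
def pat3 : List Int := [3, 3, 1, 1, 2, 2, 4, 4, 5, 5]

-- one `if answer == student_k[idx % len]` counter update of A's loop
def stepMod (pat : List Int) (c : Int) (p : Int × Int) : Int :=
  if p.2 = PySem.List.pyGetD pat (PySem.Int.mod p.1 (pat.length : Int)) 0 then c + 1 else c

-- A's loop body: the three counter updates performed on each (idx, answer)
def stepA (n : Int × Int × Int) (p : Int × Int) : Int × Int × Int :=
  (stepMod pat1 n.1 p, stepMod pat2 n.2.1 p, stepMod pat3 n.2.2 p)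

def solution (answers : List Int) : List Int :=
  let nums := (PySem.List.enumerate answers 0).foldl stepA (0, 0, 0)
  let result : List Int := [nums.1, nums.2.1, nums.2.2]
  (PySem.List.enumerate result 0).foldl
    (fun w sn => if sn.2 = (PySem.List.max? result (fun y => y)).getD 0 then w ++ [sn.1 + 1] else w) []

-- ===== PORT B =====
-- Source B's _score loop body: refill `rest` from the pattern when exhausted, pop its head, compare
def cycStep (full : List Int) (st : Int × List Int) (a : Int) : Int × List Int :=
  match (if st.2.isEmpty then full else st.2) with
  | [] => st
  | p :: rs => ((if a = p then st.1 + 1 else st.1), rs)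

def cycScore (full : List Int) (answers : List Int) : Int :=
  (answers.foldl (cycStep full) (0, [])).1

def solution_alt (answers : List Int) : List Int :=
  let scores := [pat1, pat2, pat3].map (fun pat => cycScore pat answers)
  let best := (PySem.List.max? scores (fun y => y)).getD 0
  (PySem.List.enumerate scores 0).filterMap (fun p => if p.2 = best then some (p.1 + 1) else none)

-- ===== PRECONDITION & SPEC =====
def Spec_solution (answers : List Int) (out : List Int) : Prop := out = solution_alt answers
instance (answers : List Int) (out : List Int) : Decidable (Spec_solution answers out) := by unfold Spec_solution; infer_instance

-- ===== CLAIM (what is proved, stated in full; the proofs are below) =====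
def Claim_equal_solution : Prop := ∀ (answers : List Int), Dom_solution answers → Spec_solution answers (solution answers)

-- ===== LEMMAS AND PROOFS =====

-- A's combined fold is the triple of the three independent counter folds
theorem foldA_split (l : List (Int × Int)) : ∀ (a b c : Int),
    l.foldl stepA (a, b, c)
      = (l.foldl (stepMod pat1) a, l.foldl (stepMod pat2) b, l.foldl (stepMod pat3) c) := by
  induction l with
  | nil => intro a b c; rfl
  | cons x t ih => intro a b c; simp only [List.foldl_cons, stepA]; exact ih _ _ _

-- the modular-index counter equals the cyclic-walk counter, for any start index k,
-- provided the (normalized) remaining cycle is the pattern dropped at k % len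
theorem cyc_eq (pat : List Int) (hp : pat ≠ []) : ∀ (ans : List Int) (k : Nat) (rest : List Int) (a : Int),
    (if rest.isEmpty then pat else rest) = pat.drop (k % pat.length) →
    (PySem.List.enumerate ans (k : Int)).foldl (stepMod pat) a
      = (ans.foldl (cycStep pat) (a, rest)).1 := by
  intro ans
  induction ans with
  | nil => intro k rest a _; simp [PySem.List.enumerate_nil]
  | cons x t ih =>
    intro k rest a hrest
    have hlen : 0 < pat.length := List.length_pos_iff.mpr hp
    have hk : k % pat.length < pat.length := Nat.mod_lt _ hlen
    have hdrop : pat.drop (k % pat.length) = pat[k % pat.length] :: pat.drop (k % pat.length + 1) :=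
      List.drop_eq_getElem_cons hk
    simp only [PySem.List.enumerate_cons, List.foldl_cons]
    have hstepA : stepMod pat a ((k : Int), x)
        = if x = pat[k % pat.length] then a + 1 else a := by
      unfold stepMod
      rw [PySem.Int.mod_natCast, PySem.List.pyGetD_natCast, List.getD_eq_getElem?_getD,
        List.getElem?_eq_getElem hk]
      rfl
    have hstepB : cycStep pat (a, rest) x
        = ((if x = pat[k % pat.length] then a + 1 else a), pat.drop (k % pat.length + 1)) := by
      simp only [cycStep]
      rw [show (if (a, rest).2.isEmpty then pat else (a, rest).2) = pat.drop (k % pat.length) from hrest,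
        hdrop]
    rw [hstepA, hstepB]
    have hnat : ((k : Int) + 1) = ((k + 1 : Nat) : Int) := by push_cast; ring
    rw [hnat]
    apply ih (k + 1) (pat.drop (k % pat.length + 1))
    have hmm : (k + 1) % pat.length = (k % pat.length + 1) % pat.length := by
      conv_lhs => rw [← Nat.mod_add_mod]
    by_cases h : k % pat.length + 1 = pat.length
    · have h1 : pat.drop (k % pat.length + 1) = [] := by rw [h]; simp
      have h2 : (k + 1) % pat.length = 0 := by rw [hmm, h, Nat.mod_self]
      simp [h1, h2]
    · have h2 : (k + 1) % pat.length = k % pat.length + 1 := by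
        rw [hmm, Nat.mod_eq_of_lt (by omega)]
      have hne : pat.drop (k % pat.length + 1) ≠ [] := by
        intro hcon
        have := List.drop_eq_nil_iff.mp hcon
        omega
      rw [h2, if_neg (by simpa [List.isEmpty_iff] using hne)]

-- each of A's counters is B's cyclic score
theorem counter_eq (pat : List Int) (hp : pat ≠ []) (ans : List Int) :
    (PySem.List.enumerate ans 0).foldl (stepMod pat) 0 = cycScore pat ans := by
  have := cyc_eq pat hp ans 0 [] 0 (by simp)
  simpa [cycScore] using this

-- the winner loop of A and the comprehension of B agree on any 3-element score list
theorem winner3 (x y z m : Int) :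
    (PySem.List.enumerate [x, y, z] 0).foldl
        (fun w sn => if sn.2 = m then w ++ [sn.1 + 1] else w) []
      = (PySem.List.enumerate [x, y, z] 0).filterMap
        (fun p => if p.2 = m then some (p.1 + 1) else none) := by
  simp only [PySem.List.enumerate_cons, PySem.List.enumerate_nil, List.foldl_cons, List.foldl_nil,
    List.filterMap_cons, List.filterMap_nil]
  split_ifs <;> rfl

-- ===== VERDICT (by name: the statement is the Claim_ definition above) =====
theorem solution_spec : Claim_equal_solution := by
  intro answers _
  unfold Spec_solution solution solution_alt
  rw [foldA_split]
  rw [counter_eq pat1 (by simp [pat1]) answers,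
      counter_eq pat2 (by simp [pat2]) answers,
      counter_eq pat3 (by simp [pat3]) answers]
  simp only [List.map]
  exact winner3 _ _ _ _
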